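-- pv_equiv track=rewrite | github.com/jkopczyn/qrcodepuzzle | bool_grid_to_puzzle_code.py | bool_grid_to_counts
-- ===== SOURCE A (Python) =====
-- def count_adjacent_ones(grid, row, col):
--     count = 0
--     height = len(grid)
--     width = len(grid[0])
--
--     # Check all 9 adjacent cells
--     for i in range(-1, 2):
--         for j in range(-1, 2):
--             # Check if adjacent cell is within grid bounds
--             adj_row = row + i
--             adj_col = col + j
--             if 0 <= adj_row < height and 0 <= adj_col < width:
--                 # Count if adjacent cell is True (1)
--                 if grid[adj_row][adj_col]:
--                     count += 1
--
--     return count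
--
-- def bool_grid_to_counts(bool_grid):
--     if not bool_grid or not bool_grid[0]:
--         return []
--
--     height = len(bool_grid)
--     width = len(bool_grid[0])
--
--     count_grid = []
--     for row in range(height):
--         count_row = []
--         for col in range(width):
--             count_row.append(count_adjacent_ones(bool_grid, row, col))
--         count_grid.append(count_row)
--     return count_grid
-- ===== SOURCE B (Python) =====
-- def bool_grid_to_counts(bool_grid):
--     if not bool_grid or not bool_grid[0]:
--         return []
--     w = len(bool_grid[0])
--     # separable pass 1: horizontal clamped 3-sums per row
--     hsum = []
--     for row in bool_grid:
--         vals = [1 if x else 0 for x in row[:w]]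
--         hsum.append([(vals[c - 1] if c > 0 else 0) + vals[c]
--                      + (vals[c + 1] if c + 1 < w else 0)
--                      for c in range(w)])
--     # separable pass 2: vertical clamped 3-sums of the row sums
--     h = len(hsum)
--     zero = [0] * w
--     out = []
--     for r in range(h):
--         up = hsum[r - 1] if r > 0 else zero
--         mid = hsum[r]
--         down = hsum[r + 1] if r + 1 < h else zero
--         out.append([a + b + c for a, b, c in zip(up, mid, down)])
--     return out
-- ===== Notes on version B (the rewrite author's own statement) =====
-- stated objective: faster
-- what changed: Replaces the per-cell 9-neighbor bounds-checked rescan with a separable box filter: one horizontal pass of clamped 3-sums per row, then one vertical pass summing three adjacent row-sum lists.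
import Mathlib
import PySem

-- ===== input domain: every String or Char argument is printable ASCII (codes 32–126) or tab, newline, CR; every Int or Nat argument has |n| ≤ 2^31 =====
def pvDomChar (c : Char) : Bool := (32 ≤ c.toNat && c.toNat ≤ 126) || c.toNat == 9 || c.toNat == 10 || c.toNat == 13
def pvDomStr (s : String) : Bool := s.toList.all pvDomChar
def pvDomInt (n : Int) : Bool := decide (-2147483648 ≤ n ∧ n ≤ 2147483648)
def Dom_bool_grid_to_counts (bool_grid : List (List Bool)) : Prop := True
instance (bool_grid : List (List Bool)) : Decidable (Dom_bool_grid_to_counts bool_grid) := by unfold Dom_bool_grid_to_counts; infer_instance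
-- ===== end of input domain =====

-- B replaces A's per-cell 9-neighbor bounds-checked rescan by a separable box filter
-- (a horizontal pass of clamped 3-sums per row, then a vertical pass over those row sums); measurably faster by a constant factor.

-- ===== PORT A =====
def count_adjacent_ones (grid : List (List Bool)) (row col : Int) : Int :=
  let height : Int := grid.length
  let width : Int := (grid.headD []).length
  (PySem.List.pyRange (-1) 2 1).foldl (fun count i =>
    (PySem.List.pyRange (-1) 2 1).foldl (fun count j =>
      if 0 ≤ row + i ∧ row + i < height ∧ 0 ≤ col + j ∧ col + j < width then
        -- grid[adj_row][adj_col]: in range under the guard (rows shorter than width are excluded by Pre_)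
        if PySem.List.pyGetD (PySem.List.pyGetD grid (row + i) []) (col + j) false then count + 1
        else count
      else count) count) 0

def bool_grid_to_counts (bool_grid : List (List Bool)) : List (List Int) :=
  if bool_grid = [] ∨ bool_grid.headD [] = [] then []
  else
    (List.range bool_grid.length).map fun (row : Nat) =>
      (List.range (bool_grid.headD []).length).map fun (col : Nat) =>
        count_adjacent_ones bool_grid (row : Int) (col : Int)

-- ===== PORT B =====
-- horizontal pass: clamped 3-sums of one row (row[:w] ported as take, exact for this nonneg bound)
def pvRowTriples (w : Nat) (row : List Bool) : List Int :=
  let vals := (row.take w).map (fun x => if x then (1 : Int) else 0)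
  (List.range w).map fun c =>
    (if 0 < c then vals.getD (c - 1) 0 else 0) + vals.getD c 0
      + (if c + 1 < w then vals.getD (c + 1) 0 else 0)

-- [a+b+c for a,b,c in zip(up, mid, down)]
def pvZip3 (a b c : List Int) : List Int :=
  (a.zip (b.zip c)).map fun p => p.1 + p.2.1 + p.2.2

def bool_grid_to_counts_alt (bool_grid : List (List Bool)) : List (List Int) :=
  if bool_grid = [] ∨ bool_grid.headD [] = [] then []
  else
    let w := (bool_grid.headD []).length
    let hsum := bool_grid.map (pvRowTriples w)
    let h := hsum.length
    let zero := List.replicate w (0 : Int)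
    (List.range h).map fun r =>
      pvZip3 (if 0 < r then hsum.getD (r - 1) zero else zero) (hsum.getD r zero)
        (if r + 1 < h then hsum.getD (r + 1) zero else zero)

-- ===== PRECONDITION & SPEC =====
-- Pre_ excludes only grids with a row shorter than the first row: there Python A raises IndexError.
def Pre_bool_grid_to_counts (bool_grid : List (List Bool)) : Prop :=
  ∀ row ∈ bool_grid, (bool_grid.headD []).length ≤ row.length
instance (bool_grid : List (List Bool)) : Decidable (Pre_bool_grid_to_counts bool_grid) := by
  unfold Pre_bool_grid_to_counts; infer_instance

def pvWitness_bool_grid_to_counts : List (List Bool) := [[true, false], [false, true]]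

def Spec_bool_grid_to_counts (bool_grid : List (List Bool)) (out : List (List Int)) : Prop := out = bool_grid_to_counts_alt bool_grid
instance (bool_grid : List (List Bool)) (out : List (List Int)) : Decidable (Spec_bool_grid_to_counts bool_grid out) := by unfold Spec_bool_grid_to_counts; infer_instance

-- ===== CLAIM (what is proved, stated in full; the proofs are below) =====
def Claim_equal_bool_grid_to_counts : Prop := ∀ (bool_grid : List (List Bool)), Dom_bool_grid_to_counts bool_grid → Pre_bool_grid_to_counts bool_grid → Spec_bool_grid_to_counts bool_grid (bool_grid_to_counts bool_grid)

-- ===== LEMMAS AND PROOFS =====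

-- a single guarded neighbor contribution, Int coordinates
def pvT (g : List (List Bool)) (w : Nat) (i j : Int) : Int :=
  if 0 ≤ i ∧ i < (g.length : Int) ∧ 0 ≤ j ∧ j < (w : Int) then
    (if (g.getD i.toNat []).getD j.toNat false then 1 else 0)
  else 0

lemma pvRange3 : PySem.List.pyRange (-1) 2 1 = [-1, 0, 1] := by decide

lemma pvPyGetD_nonneg {α : Type} (xs : List α) (i : Int) (h : 0 ≤ i) (d : α) :
    PySem.List.pyGetD xs i d = xs.getD i.toNat d := by
  simp [PySem.List.pyGetD, PySem.List.pyGet?_of_nonneg _ h, List.getD_eq_getElem?_getD]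

lemma pvStep (g : List (List Bool)) (x i j : Int) :
    (if 0 ≤ i ∧ i < (g.length : Int) ∧ 0 ≤ j ∧ j < ((g.headD []).length : Int) then
      if PySem.List.pyGetD (PySem.List.pyGetD g i []) j false then x + 1 else x
    else x) = x + pvT g (g.headD []).length i j := by
  by_cases hb : 0 ≤ i ∧ i < (g.length : Int) ∧ 0 ≤ j ∧ j < ((g.headD []).length : Int)
  · rw [if_pos hb, pvT, if_pos hb, pvPyGetD_nonneg _ _ hb.1, pvPyGetD_nonneg _ _ hb.2.2.1]
    split_ifs <;> omega
  · rw [if_neg hb, pvT, if_neg hb]; omega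

lemma cao_eq (g : List (List Bool)) (r c : Int) :
    count_adjacent_ones g r c =
      pvT g (g.headD []).length (r + -1) (c + -1) + pvT g (g.headD []).length (r + -1) (c + 0)
        + pvT g (g.headD []).length (r + -1) (c + 1)
        + pvT g (g.headD []).length (r + 0) (c + -1) + pvT g (g.headD []).length (r + 0) (c + 0)
        + pvT g (g.headD []).length (r + 0) (c + 1)
        + pvT g (g.headD []).length (r + 1) (c + -1) + pvT g (g.headD []).length (r + 1) (c + 0)
        + pvT g (g.headD []).length (r + 1) (c + 1) := by
  unfold count_adjacent_ones
  rw [pvRange3]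
  simp only [List.foldl, pvStep]
  ring

lemma pvT_row_sub1 (g : List (List Bool)) (w : Nat) (r : Nat) (j : Int) :
    pvT g w ((r : Int) + -1) j = if 0 < r then pvT g w ((r - 1 : Nat) : Int) j else 0 := by
  by_cases hr : 0 < r
  · rw [if_pos hr]; congr 1; omega
  · rw [if_neg hr, pvT, if_neg (by rintro ⟨h1, -⟩; omega)]

lemma pvT_row_add1 (g : List (List Bool)) (w : Nat) (r : Nat) (j : Int) :
    pvT g w ((r : Int) + 1) j = if r + 1 < g.length then pvT g w ((r + 1 : Nat) : Int) j else 0 := by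
  by_cases hr : r + 1 < g.length
  · rw [if_pos hr]; congr 1
  · rw [if_neg hr, pvT, if_neg (by rintro ⟨-, h2, -⟩; omega)]

lemma pvT_col_sub1 (g : List (List Bool)) (w : Nat) (i : Int) (c : Nat) :
    pvT g w i ((c : Int) + -1) = if 0 < c then pvT g w i ((c - 1 : Nat) : Int) else 0 := by
  by_cases hc : 0 < c
  · rw [if_pos hc]; congr 1; omega
  · rw [if_neg hc, pvT, if_neg (by rintro ⟨-, -, h3, -⟩; omega)]

lemma pvT_col_add1 (g : List (List Bool)) (w : Nat) (i : Int) (c : Nat) :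
    pvT g w i ((c : Int) + 1) = if c + 1 < w then pvT g w i ((c + 1 : Nat) : Int) else 0 := by
  by_cases hc : c + 1 < w
  · rw [if_pos hc]; congr 1
  · rw [if_neg hc, pvT, if_neg (by rintro ⟨-, -, -, h4⟩; omega)]

lemma pvT_nat (g : List (List Bool)) (w : Nat) (i j : Nat) (hi : i < g.length) (hj : j < w) :
    pvT g w (i : Int) (j : Int) = (if (g.getD i []).getD j false then 1 else 0) := by
  rw [pvT, if_pos (by constructor <;> [omega; constructor <;> [exact_mod_cast hi; constructor <;> [omega; exact_mod_cast hj]]])]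
  simp

lemma pvGetD_map (f : List Bool → List Int) (g : List (List Bool)) (k : Nat) (z : List Int)
    (hk : k < g.length) : (g.map f).getD k z = f (g.getD k []) := by
  rw [List.getD_eq_getElem _ _ (by simpa), List.getElem_map, ← List.getD_eq_getElem _ _ hk]

lemma pvZip3_eq_map (w : Nat) (a b c : List Int)
    (ha : a.length = w) (hb : b.length = w) (hc : c.length = w) :
    pvZip3 a b c = (List.range w).map (fun k => a.getD k 0 + b.getD k 0 + c.getD k 0) := by
  apply List.ext_getElem
  · simp [pvZip3, ha, hb, hc]
  · intro n h1 h2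
    simp only [pvZip3, List.getElem_map, List.getElem_zip, List.getElem_range]
    have hn : n < w := by simpa using h2
    rw [List.getD_eq_getElem a _ (by omega), List.getD_eq_getElem b _ (by omega),
        List.getD_eq_getElem c _ (by omega)]

lemma pvRow_entry (g : List (List Bool)) (i c : Nat)
    (hpre : Pre_bool_grid_to_counts g) (hi : i < g.length) (hc : c < (g.headD []).length) :
    (pvRowTriples (g.headD []).length (g.getD i [])).getD c 0 =
      pvT g (g.headD []).length (i : Int) ((c : Int) + -1)
        + pvT g (g.headD []).length (i : Int) ((c : Int) + 0)
        + pvT g (g.headD []).length (i : Int) ((c : Int) + 1) := by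
  set w := (g.headD []).length with hw
  set row := g.getD i [] with hrow
  have hwr : w ≤ row.length := hpre row (by rw [hrow, List.getD_eq_getElem _ _ hi]; exact List.getElem_mem _)
  have hv : ∀ j, j < w →
      (((row.take w).map (fun x => if x then (1 : Int) else 0)).getD j 0
        = if row.getD j false then (1 : Int) else 0) := by
    intro j hj
    rw [List.getD_eq_getElem _ _ (by simp; omega), List.getElem_map, List.getElem_take,
        List.getD_eq_getElem _ _ (by omega)]
  rw [pvRowTriples]
  rw [PySem.List.getD_map_range _ _ _ _ hc]
  rw [pvT_col_sub1, pvT_col_add1, add_zero, pvT_nat g w i c hi hc]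
  by_cases h1 : 0 < c <;> by_cases h2 : c + 1 < w <;>
    simp only [h1, h2, if_false, if_pos] <;>
      (rw [hv c hc]
       try rw [pvT_nat g w i (c-1) hi (by omega), hv (c-1) (by omega)]
       try rw [pvT_nat g w i (c+1) hi (by omega), hv (c+1) (by omega)])

lemma pvLen_rowTriples (w : Nat) (row : List Bool) : (pvRowTriples w row).length = w := by
  simp [pvRowTriples]

-- ===== VERDICT (by name: the statement is the Claim_ definition above) =====
theorem bool_grid_to_counts_spec : Claim_equal_bool_grid_to_counts := by
  intro g _ hpre
  unfold Spec_bool_grid_to_counts bool_grid_to_counts bool_grid_to_counts_alt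
  by_cases hg : g = [] ∨ g.headD [] = []
  · rw [if_pos hg, if_pos hg]
  · rw [if_neg hg, if_neg hg]
    simp only [List.length_map]
    set w := (g.headD []).length with hw
    apply List.map_congr_left
    intro r hr
    have hrlt : r < g.length := List.mem_range.mp hr
    have hzl : (List.replicate w (0 : Int)).length = w := by simp
    have hup : (if 0 < r then (g.map (pvRowTriples w)).getD (r - 1) (List.replicate w 0)
        else List.replicate w 0).length = w := by
      split
      · rw [pvGetD_map _ _ _ _ (by omega), pvLen_rowTriples]
      · exact hzl
    have hmid : ((g.map (pvRowTriples w)).getD r (List.replicate w 0)).length = w := by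
      rw [pvGetD_map _ _ _ _ hrlt, pvLen_rowTriples]
    have hdown : (if r + 1 < g.length then (g.map (pvRowTriples w)).getD (r + 1) (List.replicate w 0)
        else List.replicate w 0).length = w := by
      split
      · rw [pvGetD_map _ _ _ _ (by omega), pvLen_rowTriples]
      · exact hzl
    rw [pvZip3_eq_map w _ _ _ hup hmid hdown]
    apply List.map_congr_left
    intro c hc
    have hclt : c < w := List.mem_range.mp hc
    have hz0 : (List.replicate w (0:Int)).getD c 0 = 0 := by
      simp [List.getD_eq_getElem?_getD, hclt]
    rw [cao_eq]
    simp only [← hw, add_zero, pvT_row_sub1, pvT_row_add1]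
    by_cases h1 : 0 < r <;> by_cases h2 : r + 1 < g.length <;>
      simp only [h1, h2, if_false, if_pos] <;>
        (rw [pvGetD_map _ _ _ _ hrlt, pvRow_entry g r c hpre hrlt hclt]
         try rw [pvGetD_map _ _ _ (List.replicate w 0) (show r - 1 < g.length by omega),
                 pvRow_entry g (r-1) c hpre (by omega) hclt]
         try rw [pvGetD_map _ _ _ (List.replicate w 0) (show r + 1 < g.length from h2),
                 pvRow_entry g (r+1) c hpre h2 hclt]) <;>
      (simp only [← hw, hz0]; ring_nf)
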